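-- pv_equiv track=rewrite | github.com/Vladimir-Cool/Python_practice | Яндекс/Algorithms/Lisens/Lisen3 Task2.py | wordsindict
-- ===== SOURCE A (Python) =====
-- def wordsindict(dictionary:list, text:list) -> list:
--     goodwords = set(dictionary)
--     for word in dictionary:
--         for delpos in range(len(word)):
--             goodwords.add(word[:delpos] + word[delpos+1:])
--     ans = []
--     for word in text:
--         ans.append(word in goodwords)
--     return ans
-- ===== SOURCE B (Python) =====
-- def _one_del(longer, shorter):
--     # True iff deleting exactly one character from `longer` yields `shorter`
--     # (assuming len(longer) == len(shorter) + 1): skip the common prefix,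
--     # drop the first mismatching character of `longer`, compare the rest.
--     i = 0
--     n = len(shorter)
--     while i < n and longer[i] == shorter[i]:
--         i += 1
--     return longer[i + 1:] == shorter[i:]
--
--
-- def wordsindict(dictionary: list, text: list) -> list:
--     exact = set(dictionary)
--     return [w in exact or
--             any(len(d) == len(w) + 1 and _one_del(d, w) for d in dictionary)
--             for w in text]
-- ===== Notes on version B (the rewrite author's own statement) =====
-- stated objective: alternative
-- what changed: B builds no deletion set at all: for each text word it scans the dictionary directly, matching by equality or by a single-pass first-mismatch one-deletion comparison against words exactly one character longer.
import Mathlib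
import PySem

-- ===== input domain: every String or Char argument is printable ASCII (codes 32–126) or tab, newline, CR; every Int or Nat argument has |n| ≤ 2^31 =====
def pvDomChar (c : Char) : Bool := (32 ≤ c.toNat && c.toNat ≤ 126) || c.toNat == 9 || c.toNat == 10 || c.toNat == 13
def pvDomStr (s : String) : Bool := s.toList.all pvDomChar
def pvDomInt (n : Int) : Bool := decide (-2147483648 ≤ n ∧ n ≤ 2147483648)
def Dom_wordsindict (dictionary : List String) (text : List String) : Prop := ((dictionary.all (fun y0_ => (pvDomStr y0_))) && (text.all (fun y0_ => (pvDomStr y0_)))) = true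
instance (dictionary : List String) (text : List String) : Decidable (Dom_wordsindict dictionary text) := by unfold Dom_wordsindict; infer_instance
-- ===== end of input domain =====

-- B drops A's precomputed deletion set and instead checks each text word directly against the
-- dictionary with a first-mismatch one-deletion comparison (alternative decomposition, not faster).


-- ===== PORT A =====
-- word[:delpos] + word[delpos+1:] for word : String
def pvDelAt (word : String) (delpos : Int) : String :=
  PySem.Str.slice word none (some delpos) ++ PySem.Str.slice word (some (delpos + 1)) none

def wordsindict (dictionary : List String) (text : List String) : List Bool :=
  let goodwords : PySem.Set String := PySem.Set.ofList dictionary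
  let goodwords : PySem.Set String :=
    dictionary.foldl (fun gw word =>
      (PySem.List.pyRange 0 (PySem.Str.len word) 1).foldl
        (fun gw delpos => PySem.Set.add gw (pvDelAt word delpos)) gw) goodwords
  text.foldl (fun ans word => ans ++ [PySem.Set.contains goodwords word]) []

-- ===== PORT B =====
-- _one_del(longer, shorter): advance over the common prefix; at the first mismatch (or at
-- the end of `shorter`) drop that character of `longer` and require the rest to coincide.
-- Hand port: the index-advancing while loop becomes this structural recursion over the
-- two character lists (position i = characters already consumed).
def oneDel : List Char → List Char → Bool
  | [], _ => false                                     -- unreachable under the caller's length guard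
  | _ :: as, [] => as.isEmpty                          -- i = len(shorter): longer[i+1:] == ''
  | a :: as, b :: bs => if a == b then oneDel as bs else as == b :: bs

def wordsindict_alt (dictionary : List String) (text : List String) : List Bool :=
  let exact : PySem.Set String := PySem.Set.ofList dictionary
  text.map (fun w =>
    PySem.Set.contains exact w ||
      dictionary.any (fun d =>
        PySem.Str.len d == PySem.Str.len w + 1 && oneDel d.toList w.toList))

-- ===== PRECONDITION & SPEC =====
def Spec_wordsindict (dictionary : List String) (text : List String) (out : List Bool) : Prop := out = wordsindict_alt dictionary text
instance (dictionary : List String) (text : List String) (out : List Bool) : Decidable (Spec_wordsindict dictionary text out) := by unfold Spec_wordsindict; infer_instance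

-- ===== CLAIM (what is proved, stated in full; the proofs are below) =====
def Claim_equal_wordsindict : Prop := ∀ (dictionary : List String) (text : List String), Dom_wordsindict dictionary text → Spec_wordsindict dictionary text (wordsindict dictionary text)

-- ===== LEMMAS AND PROOFS =====

-- oneDel recognises exactly the one-character deletions.
theorem oneDel_iff (xs ys : List Char) :
    oneDel xs ys = true ↔ ∃ p < xs.length, xs.eraseIdx p = ys := by
  induction xs generalizing ys with
  | nil => simp [oneDel]
  | cons a as ih =>
    cases ys with
    | nil =>
      simp only [oneDel, List.isEmpty_iff]
      constructor
      · rintro rfl; exact ⟨0, by simp, rfl⟩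
      · rintro ⟨p, hp, he⟩
        cases p with
        | zero => simpa using he
        | succ q => simp [List.eraseIdx] at he
    | cons b bs =>
      simp only [oneDel]
      by_cases hab : a = b
      · subst hab
        simp only [beq_self_eq_true, if_true, ih]
        constructor
        · rintro ⟨p, hp, rfl⟩
          exact ⟨p + 1, by simpa using hp, rfl⟩
        · rintro ⟨p, hp, he⟩
          cases p with
          | zero =>
            simp only [List.eraseIdx] at he
            subst he
            exact ⟨0, by simp, rfl⟩
          | succ q =>
            simp only [List.eraseIdx] at he
            exact ⟨q, by simpa using hp, by simpa using he⟩
      · rw [if_neg (by simp [hab]), beq_iff_eq]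
        constructor
        · rintro rfl; exact ⟨0, by simp, rfl⟩
        · rintro ⟨p, hp, he⟩
          cases p with
          | zero => simpa [List.eraseIdx] using he
          | succ q =>
            simp only [List.eraseIdx, List.cons.injEq] at he
            exact absurd he.1 hab

-- membership in A's nested add-loop
theorem mem_nested_foldl {α β γ : Type} [BEq α] [LawfulBEq α]
    (l : List β) (r : β → List γ) (f : β → γ → α) (s : PySem.Set α) (y : α) :
    y ∈ l.foldl (fun s b => (r b).foldl (fun s c => PySem.Set.add s (f b c)) s) s ↔
      y ∈ s ∨ ∃ b ∈ l, ∃ c ∈ r b, y = f b c := by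
  induction l generalizing s with
  | nil => simp
  | cons b l ih =>
    simp only [List.foldl_cons, ih, PySem.Set.mem_foldl_add]
    constructor
    · rintro (⟨h | ⟨c, hc, rfl⟩⟩ | ⟨b', hb', c, hc, rfl⟩)
      · exact Or.inl h
      · exact Or.inr ⟨b, by simp, c, hc, rfl⟩
      · exact Or.inr ⟨b', by simp [hb'], c, hc, rfl⟩
    · rintro (h | ⟨b', hb', c, hc, rfl⟩)
      · exact Or.inl (Or.inl h)
      · rcases List.mem_cons.mp hb' with rfl | hb'
        · exact Or.inl (Or.inr ⟨c, hc, rfl⟩)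
        · exact Or.inr ⟨b', hb', c, hc, rfl⟩

theorem toList_pvDelAt (word : String) (p : Nat) :
    (pvDelAt word (p : Int)).toList = word.toList.eraseIdx p := by
  have h1 : ((p : Int) + 1) = ((p + 1 : Nat) : Int) := by push_cast; ring
  simp only [pvDelAt, String.toList_append, PySem.Str.toList_slice,
    PySem.Chars.slice_eq_listSlice, h1, PySem.List.slice_to_natCast,
    PySem.List.slice_from_natCast, List.eraseIdx_eq_take_drop_succ]

-- the per-word bridge: "w is a one-deletion of word" both ways
theorem perword (word w : String) :
    (∃ c ∈ PySem.List.pyRange 0 (PySem.Str.len word) 1, w = pvDelAt word c) ↔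
      (PySem.Str.len word = PySem.Str.len w + 1 ∧ oneDel word.toList w.toList = true) := by
  have hlen : PySem.Str.len word = (word.toList.length : Int) := PySem.Str.len_eq word
  constructor
  · rintro ⟨c, hc, rfl⟩
    rw [hlen, PySem.List.pyRange_one] at hc
    simp only [List.mem_map, List.mem_range, zero_add, sub_zero, Int.toNat_natCast] at hc
    obtain ⟨k, hk, rfl⟩ := hc
    have he := toList_pvDelAt word k
    constructor
    · rw [hlen, PySem.Str.len_eq, he]
      have := List.length_eraseIdx_of_lt hk
      omega
    · rw [oneDel_iff]
      exact ⟨k, hk, he.symm⟩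
  · rintro ⟨hl, hd⟩
    rw [oneDel_iff] at hd
    obtain ⟨k, hk, he⟩ := hd
    refine ⟨(k : Int), ?_, ?_⟩
    · rw [hlen, PySem.List.pyRange_one]
      simp only [List.mem_map, List.mem_range, Int.toNat_natCast, zero_add, sub_zero]
      exact ⟨k, hk, rfl⟩
    · exact (String.toList_inj.mp (by rw [toList_pvDelAt word k, he])).symm

theorem pointwise (dictionary : List String) (w : String) :
    PySem.Set.contains
      (dictionary.foldl (fun gw word =>
        (PySem.List.pyRange 0 (PySem.Str.len word) 1).foldl
          (fun gw delpos => PySem.Set.add gw (pvDelAt word delpos)) gw)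
        (PySem.Set.ofList dictionary)) w
    = (PySem.Set.contains (PySem.Set.ofList dictionary) w ||
        dictionary.any (fun d =>
          PySem.Str.len d == PySem.Str.len w + 1 && oneDel d.toList w.toList)) := by
  rw [Bool.eq_iff_iff, PySem.Set.contains_iff, mem_nested_foldl]
  simp only [PySem.Set.mem_ofList, Bool.or_eq_true, PySem.Set.contains_iff,
    List.any_eq_true, Bool.and_eq_true, beq_iff_eq]
  constructor
  · rintro (h | ⟨word, hw, hdel⟩)
    · exact Or.inl h
    · exact Or.inr ⟨word, hw, (perword word w).mp hdel⟩
  · rintro (h | ⟨word, hw, hc⟩)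
    · exact Or.inl h
    · exact Or.inr ⟨word, hw, (perword word w).mpr hc⟩

-- ===== VERDICT (by name: the statement is the Claim_ definition above) =====
theorem wordsindict_spec : Claim_equal_wordsindict := by
  intro dictionary text _
  unfold Spec_wordsindict wordsindict wordsindict_alt
  simp only [PySem.List.foldl_append_singleton_eq_map, List.nil_append]
  exact List.map_congr_left (fun w _ => pointwise dictionary w)
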